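-- pv_equiv track=rewrite | github.com/isi-boston/ed-pooling | better_events/better_mapper.py | get_distance_from_other_spans
-- ===== SOURCE A (Python) =====
-- from typing import List, Tuple, Optional, AbstractSet, Union
--
-- def get_distance_from_other_spans(
--     span: Tuple[int, int], other_spans: List[Tuple[int, int]],
-- ) -> Tuple[int, int, int]:
--     """Get the minimum distance (in characters) of this span from any of
--     the other spans provided. All spans are represented as a tuple of
--     start/end offsets.
--
--     Also returns the span start/end so we can trivially use this for
--     deterministic sorting.
--     """
--     if not other_spans:
--         return 0, span[0], span[1]
--
--     distances = []
--     for a in other_spans: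
--         if span[1] <= a[0]:
--             distances.append(a[0] - span[1])
--         elif span[0] >= a[1]:
--             distances.append(span[0] - a[1])
--         else:
--             # span and anchor overlap
--             distances.append(0)
--
--     # Including span start/end to avoid ties
--     return min(distances), span[0], span[1]
-- ===== SOURCE B (Python) =====
-- def get_distance_from_other_spans(span, other_spans):
--     start, end = span
--     if not other_spans:
--         return 0, start, end
--     # partition the other spans into the three classes A's branches distinguish,
--     # then take one aggregate per class instead of a per-span distance list
--     after_starts = [a for a, b in other_spans if end <= a]
--     before_ends = [b for a, b in other_spans if a < end and b <= start]
--     cands = []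
--     if after_starts:
--         cands.append(min(after_starts) - end)
--     if before_ends:
--         cands.append(start - max(before_ends))
--     if len(after_starts) + len(before_ends) < len(other_spans):
--         cands.append(0)  # some remaining span overlaps
--     return min(cands), start, end
-- ===== Notes on version B (the rewrite author's own statement) =====
-- stated objective: alternative
-- what changed: Instead of appending a per-span branch distance to a list and taking min of it, B partitions the other spans into after/before/overlapping classes and combines one aggregate per class (min of after-starts minus end, start minus max of before-ends, and 0 if any span overlaps).
import Mathlib
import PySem

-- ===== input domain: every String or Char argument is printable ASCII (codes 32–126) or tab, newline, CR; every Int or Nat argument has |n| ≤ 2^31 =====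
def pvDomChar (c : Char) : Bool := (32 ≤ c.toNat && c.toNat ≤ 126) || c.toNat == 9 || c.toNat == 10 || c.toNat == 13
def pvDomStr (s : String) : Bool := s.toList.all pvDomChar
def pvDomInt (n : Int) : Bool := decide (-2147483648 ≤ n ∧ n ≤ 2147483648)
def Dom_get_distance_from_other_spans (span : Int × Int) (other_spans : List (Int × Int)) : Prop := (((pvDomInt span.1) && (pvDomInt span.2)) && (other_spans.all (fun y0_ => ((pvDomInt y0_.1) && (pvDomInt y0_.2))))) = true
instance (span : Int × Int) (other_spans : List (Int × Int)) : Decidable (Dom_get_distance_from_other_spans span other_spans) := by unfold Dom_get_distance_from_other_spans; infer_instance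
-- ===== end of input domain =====

-- B replaces A's per-span branch-distance list + min with a partition of the other spans
-- into after/before/overlap classes combined by one aggregate each (alternative decomposition, same cost).


-- Python's builtin min/max on a NONEMPTY list of ints (both ports call it only under a
-- nonemptiness guard, exactly as both Pythons do; on [] Python raises, unreachable here).
def pyMinList (l : List Int) : Int :=
  match l with
  | [] => 0
  | x :: t => t.foldl min x

def pyMaxList (l : List Int) : Int :=
  match l with
  | [] => 0
  | x :: t => t.foldl max x

-- ===== PORT A =====
def get_distance_from_other_spans (span : Int × Int) (other_spans : List (Int × Int)) : Int × Int × Int :=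
  if other_spans = [] then (0, span.1, span.2)
  else
    let distances : List Int :=
      other_spans.foldl (fun ds a =>
        if span.2 ≤ a.1 then ds ++ [a.1 - span.2]
        else if span.1 ≥ a.2 then ds ++ [span.1 - a.2]
        else ds ++ [0]) []
    (pyMinList distances, span.1, span.2)

-- ===== PORT B =====
def get_distance_from_other_spans_alt (span : Int × Int) (other_spans : List (Int × Int)) : Int × Int × Int :=
  let start := span.1
  let stop := span.2
  if other_spans = [] then (0, start, stop)
  else
    let after_starts := (other_spans.filter (fun a => stop ≤ a.1)).map (fun a => a.1)
    let before_ends := (other_spans.filter (fun a => a.1 < stop && a.2 ≤ start)).map (fun a => a.2)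
    let cands : List Int := []
    let cands := if after_starts ≠ [] then cands ++ [pyMinList after_starts - stop] else cands
    let cands := if before_ends ≠ [] then cands ++ [start - pyMaxList before_ends] else cands
    let cands := if (after_starts.length : Int) + (before_ends.length : Int) < (other_spans.length : Int) then cands ++ [0] else cands
    (pyMinList cands, start, stop)

-- ===== PRECONDITION & SPEC =====
def Spec_get_distance_from_other_spans (span : Int × Int) (other_spans : List (Int × Int)) (out : Int × Int × Int) : Prop := out = get_distance_from_other_spans_alt span other_spans
instance (span : Int × Int) (other_spans : List (Int × Int)) (out : Int × Int × Int) : Decidable (Spec_get_distance_from_other_spans span other_spans out) := by unfold Spec_get_distance_from_other_spans; infer_instance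

-- ===== CLAIM (what is proved, stated in full; the proofs are below) =====
def Claim_equal_get_distance_from_other_spans : Prop := ∀ (span : Int × Int) (other_spans : List (Int × Int)), Dom_get_distance_from_other_spans span other_spans → Spec_get_distance_from_other_spans span other_spans (get_distance_from_other_spans span other_spans)

-- ===== LEMMAS AND PROOFS =====

-- the per-span branch distance A's loop appends
def gval (s e : Int) (a : Int × Int) : Int :=
  if e ≤ a.1 then a.1 - e else if s ≥ a.2 then s - a.2 else 0

-- B's candidate list, written out (the port builds the same list through its let-chain)
def candList (s e : Int) (l : List (Int × Int)) : List Int :=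
  (if ((l.filter (fun a => e ≤ a.1)).map (fun a => a.1)) ≠ []
     then [pyMinList ((l.filter (fun a => e ≤ a.1)).map (fun a => a.1)) - e] else []) ++
  (if ((l.filter (fun a => a.1 < e && a.2 ≤ s)).map (fun a => a.2)) ≠ []
     then [s - pyMaxList ((l.filter (fun a => a.1 < e && a.2 ≤ s)).map (fun a => a.2))] else []) ++
  (if ((((l.filter (fun a => e ≤ a.1)).map (fun a => a.1)).length : Int) + ((((l.filter (fun a => a.1 < e && a.2 ≤ s)).map (fun a => a.2))).length : Int) < (l.length : Int))
     then [0] else [])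

theorem pyMinList_mem {l : List Int} (h : l ≠ []) : pyMinList l ∈ l := by
  match l with
  | [] => exact absurd rfl h
  | x :: t =>
      simp only [pyMinList]
      rcases PySem.List.foldl_min_mem t x with h1 | h1
      · rw [h1]; exact List.mem_cons_self
      · exact List.mem_cons_of_mem _ h1

theorem pyMinList_le {l : List Int} {y : Int} (hy : y ∈ l) : pyMinList l ≤ y := by
  match l with
  | x :: t =>
      simp only [pyMinList]
      rcases List.mem_cons.mp hy with rfl | hy'
      · exact (PySem.List.foldl_min_le t y).1
      · exact (PySem.List.foldl_min_le t x).2 y hy'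

theorem pyMaxList_le {l : List Int} {y : Int} (hy : y ∈ l) : y ≤ pyMaxList l := by
  match l with
  | x :: t =>
      simp only [pyMaxList]
      rcases List.mem_cons.mp hy with rfl | hy'
      · exact (PySem.List.le_foldl_max t y).1
      · exact (PySem.List.le_foldl_max t x).2 y hy'

theorem pyMaxList_mem {l : List Int} (h : l ≠ []) : pyMaxList l ∈ l := by
  match l with
  | [] => exact absurd rfl h
  | x :: t =>
      simp only [pyMaxList]
      rcases PySem.List.foldl_max_mem t x with h1 | h1
      · rw [h1]; exact List.mem_cons_self
      · exact List.mem_cons_of_mem _ h1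

-- A's accumulator loop builds exactly the map of the branch distance
theorem distances_eq_map (s e : Int) (l : List (Int × Int)) (acc : List Int) :
    l.foldl (fun ds a =>
        if e ≤ a.1 then ds ++ [a.1 - e]
        else if s ≥ a.2 then ds ++ [s - a.2]
        else ds ++ [0]) acc = acc ++ l.map (gval s e) := by
  induction l generalizing acc with
  | nil => simp
  | cons a t ih =>
      simp only [List.foldl_cons, List.map_cons, gval]
      split_ifs with h1 h2 <;> · rw [ih]; simp

-- lengths of two filters with mutually exclusive predicates add up to one filter
theorem filter_two_length {α : Type} (p q : α → Bool) (l : List α)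
    (hpq : ∀ a, ¬(p a = true ∧ q a = true)) :
    (l.filter p).length + (l.filter q).length =
      (l.filter (fun a => p a || q a)).length := by
  induction l with
  | nil => simp
  | cons a t ih =>
      by_cases hp : p a = true
      · have hq : q a = false := by
          cases hqa : q a
          · rfl
          · exact absurd ⟨hp, hqa⟩ (hpq a)
        simp [hp, hq, ← ih]
        omega
      · simp only [Bool.not_eq_true] at hp
        by_cases hq : q a = true
        · simp [hp, hq, ← ih]
          omega
        · simp only [Bool.not_eq_true] at hq
          simp [hp, hq, ← ih]

-- every candidate of B is one of A's distances
theorem cand_mem_map (s e : Int) (l : List (Int × Int)) {c : Int}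
    (hc : c ∈ candList s e l) : c ∈ l.map (gval s e) := by
  unfold candList at hc
  simp only [List.mem_append] at hc
  rcases hc with (hc | hc) | hc
  · -- after class
    split_ifs at hc with h
    · simp only [List.mem_singleton] at hc
      subst hc
      have hm := pyMinList_mem h
      simp only [List.mem_map, List.mem_filter] at hm
      obtain ⟨a, ⟨ha, hcond⟩, heq⟩ := hm
      simp only [decide_eq_true_eq] at hcond
      refine List.mem_map.mpr ⟨a, ha, ?_⟩
      have hg : gval s e a = a.1 - e := by simp [gval, hcond]
      rw [hg, heq]
    · simp at hc
  · -- before class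
    split_ifs at hc with h
    · simp only [List.mem_singleton] at hc
      subst hc
      have hm := pyMaxList_mem h
      simp only [List.mem_map, List.mem_filter] at hm
      obtain ⟨a, ⟨ha, hcond⟩, heq⟩ := hm
      simp only [Bool.and_eq_true, decide_eq_true_eq] at hcond
      refine List.mem_map.mpr ⟨a, ha, ?_⟩
      have h1 : ¬ e ≤ a.1 := by omega
      have hg : gval s e a = s - a.2 := by simp [gval, h1]; omega
      rw [hg, heq]
    · simp at hc
  · -- overlap class
    split_ifs at hc with h
    · simp only [List.mem_singleton] at hc
      subst hc
      simp only [List.length_map] at h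
      have hlen : (l.filter (fun a => decide (e ≤ a.1))).length
          + (l.filter (fun a => decide (a.1 < e) && decide (a.2 ≤ s))).length
          = (l.filter (fun a => decide (e ≤ a.1) || (decide (a.1 < e) && decide (a.2 ≤ s)))).length := by
        apply filter_two_length
        intro a h'
        simp only [Bool.and_eq_true, decide_eq_true_eq] at h'
        omega
      have hlt : (l.filter (fun a => decide (e ≤ a.1) || (decide (a.1 < e) && decide (a.2 ≤ s)))).length < l.length := by omega
      obtain ⟨a, ha, hna⟩ := List.length_filter_lt_length_iff_exists.mp hlt
      simp only [Bool.or_eq_true, Bool.and_eq_true, decide_eq_true_eq, not_or, not_and] at hna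
      refine List.mem_map.mpr ⟨a, ha, ?_⟩
      have h1 : ¬ e ≤ a.1 := by omega
      have h2 : ¬ s ≥ a.2 := by omega
      simp [gval, h1, h2]
    · simp at hc

-- B's candidate minimum is below each of A's distances
theorem cand_min_le (s e : Int) (l : List (Int × Int)) {d : Int}
    (hd : d ∈ l.map (gval s e)) : pyMinList (candList s e l) ≤ d := by
  obtain ⟨a, ha, rfl⟩ := List.mem_map.mp hd
  by_cases h1 : e ≤ a.1
  · -- after class: the first candidate exists and is ≤ gval a
    have hmemAS : a.1 ∈ (l.filter (fun a => decide (e ≤ a.1))).map (fun a => a.1) :=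
      List.mem_map.mpr ⟨a, List.mem_filter.mpr ⟨ha, by simpa using h1⟩, rfl⟩
    have hne : ((l.filter (fun a => decide (e ≤ a.1))).map (fun a => a.1)) ≠ [] :=
      List.ne_nil_of_mem hmemAS
    have hc : (pyMinList ((l.filter (fun a => decide (e ≤ a.1))).map (fun a => a.1)) - e) ∈ candList s e l := by
      unfold candList
      simp [hne]
    calc pyMinList (candList s e l) ≤ _ := pyMinList_le hc
      _ ≤ a.1 - e := by have := pyMinList_le hmemAS; omega
      _ = gval s e a := by simp [gval, h1]
  · by_cases h2 : s ≥ a.2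
    · -- before class
      have hmemBE : a.2 ∈ (l.filter (fun a => decide (a.1 < e) && decide (a.2 ≤ s))).map (fun a => a.2) :=
        List.mem_map.mpr ⟨a, List.mem_filter.mpr ⟨ha, by simp; omega⟩, rfl⟩
      have hne : ((l.filter (fun a => decide (a.1 < e) && decide (a.2 ≤ s))).map (fun a => a.2)) ≠ [] :=
        List.ne_nil_of_mem hmemBE
      have hc : (s - pyMaxList ((l.filter (fun a => decide (a.1 < e) && decide (a.2 ≤ s))).map (fun a => a.2))) ∈ candList s e l := by
        unfold candList
        simp [hne]
      calc pyMinList (candList s e l) ≤ _ := pyMinList_le hc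
        _ ≤ s - a.2 := by have := pyMaxList_le hmemBE; omega
        _ = gval s e a := by simp [gval, h1, h2]
    · -- overlap class: 0 is a candidate
      have hnp : ¬ ((fun a : Int × Int => decide (e ≤ a.1) || (decide (a.1 < e) && decide (a.2 ≤ s))) a = true) := by
        simp only [Bool.or_eq_true, Bool.and_eq_true, decide_eq_true_eq]
        omega
      have hlt : (l.filter (fun a => decide (e ≤ a.1) || (decide (a.1 < e) && decide (a.2 ≤ s)))).length < l.length :=
        List.length_filter_lt_length_iff_exists.mpr ⟨a, ha, hnp⟩
      have hlen : (l.filter (fun a => decide (e ≤ a.1))).length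
          + (l.filter (fun a => decide (a.1 < e) && decide (a.2 ≤ s))).length
          = (l.filter (fun a => decide (e ≤ a.1) || (decide (a.1 < e) && decide (a.2 ≤ s)))).length := by
        apply filter_two_length
        intro a h'
        simp only [Bool.and_eq_true, decide_eq_true_eq] at h'
        omega
      have hc : (0 : Int) ∈ candList s e l := by
        unfold candList
        have hcond : ((((l.filter (fun a => decide (e ≤ a.1))).map (fun a => a.1)).length : Int)
            + ((((l.filter (fun a => decide (a.1 < e) && decide (a.2 ≤ s))).map (fun a => a.2))).length : Int) < (l.length : Int)) := by
          simp only [List.length_map]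
          exact_mod_cast by omega
        refine List.mem_append_right _ ?_
        rw [if_pos hcond]
        exact List.mem_singleton.mpr rfl
      have := pyMinList_le hc
      have hg : gval s e a = 0 := by simp [gval, h1, h2]
      omega

-- B's candidate list is nonempty when the span list is
theorem candList_ne_nil (s e : Int) (l : List (Int × Int)) (hl : l ≠ []) :
    candList s e l ≠ [] := by
  match l with
  | a :: t =>
      by_cases h1 : e ≤ a.1
      · have hmemAS : a.1 ∈ ((a :: t).filter (fun a => decide (e ≤ a.1))).map (fun a => a.1) :=
          List.mem_map.mpr ⟨a, List.mem_filter.mpr ⟨List.mem_cons_self, by simpa using h1⟩, rfl⟩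
        unfold candList
        simp [List.ne_nil_of_mem hmemAS]
      · by_cases h2 : s ≥ a.2
        · have hmemBE : a.2 ∈ ((a :: t).filter (fun a => decide (a.1 < e) && decide (a.2 ≤ s))).map (fun a => a.2) :=
            List.mem_map.mpr ⟨a, List.mem_filter.mpr ⟨List.mem_cons_self, by simp; omega⟩, rfl⟩
          unfold candList
          rcases (instDecidableNot (p := (((a :: t).filter (fun a => decide (e ≤ a.1))).map (fun a => a.1)) = [])) with _ | _ <;>
            simp [List.ne_nil_of_mem hmemBE]
        · have hnp : ¬ ((fun a : Int × Int => decide (e ≤ a.1) || (decide (a.1 < e) && decide (a.2 ≤ s))) a = true) := by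
            simp only [Bool.or_eq_true, Bool.and_eq_true, decide_eq_true_eq]
            omega
          have hlt : ((a :: t).filter (fun a => decide (e ≤ a.1) || (decide (a.1 < e) && decide (a.2 ≤ s)))).length < (a :: t).length :=
            List.length_filter_lt_length_iff_exists.mpr ⟨a, List.mem_cons_self, hnp⟩
          have hlen : ((a :: t).filter (fun a => decide (e ≤ a.1))).length
              + ((a :: t).filter (fun a => decide (a.1 < e) && decide (a.2 ≤ s))).length
              = ((a :: t).filter (fun a => decide (e ≤ a.1) || (decide (a.1 < e) && decide (a.2 ≤ s)))).length := by
            apply filter_two_length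
            intro a h'
            simp only [Bool.and_eq_true, decide_eq_true_eq] at h'
            omega
          have hcond : (((((a :: t).filter (fun a => decide (e ≤ a.1))).map (fun a => a.1)).length : Int)
              + (((((a :: t).filter (fun a => decide (a.1 < e) && decide (a.2 ≤ s))).map (fun a => a.2))).length : Int) < ((a :: t).length : Int)) := by
            simp only [List.length_map]
            exact_mod_cast by omega
          unfold candList
          intro hcontra
          have hz := (List.append_eq_nil_iff.mp hcontra).2
          rw [if_pos hcond] at hz
          exact absurd hz (by simp)

-- the two minima agree
theorem min_cand_eq_min_map (s e : Int) (l : List (Int × Int)) (hl : l ≠ []) :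
    pyMinList (candList s e l) = pyMinList (l.map (gval s e)) := by
  have hmapne : l.map (gval s e) ≠ [] := by
    intro h
    exact hl (List.map_eq_nil_iff.mp h)
  apply le_antisymm
  · exact cand_min_le s e l (pyMinList_mem hmapne)
  · exact pyMinList_le (cand_mem_map s e l (pyMinList_mem (candList_ne_nil s e l hl)))

-- B's port computes the candidate-list minimum
theorem alt_eq_cand (span : Int × Int) (l : List (Int × Int)) (hl : l ≠ []) :
    get_distance_from_other_spans_alt span l = (pyMinList (candList span.1 span.2 l), span.1, span.2) := by
  unfold get_distance_from_other_spans_alt candList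
  simp only [hl, if_false]
  split_ifs <;> simp_all

theorem get_distance_from_other_spans_spec : Claim_equal_get_distance_from_other_spans := by
  unfold Claim_equal_get_distance_from_other_spans
  intro span l _
  unfold Spec_get_distance_from_other_spans
  by_cases hl : l = []
  · subst hl
    rfl
  · rw [alt_eq_cand span l hl]
    unfold get_distance_from_other_spans
    simp only [hl, if_false]
    rw [distances_eq_map span.1 span.2 l []]
    simp only [List.nil_append]
    rw [min_cand_eq_min_map span.1 span.2 l hl]
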